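-- pv_equiv track=rewrite | github.com/rmurcioUCL/FF | flowdir.py | groupbyHour
-- ===== SOURCE A (Python) =====
-- import operator
--
-- def groupbyHour(mydata):
--     agglist = [-1]*24
--     c=0
--
--     for i in range(0,278,12):
--         s0=mydata[i:i+12].count(0)
--         s1=mydata[i:i+12].count(1)
--         s2=mydata[i:i+12].count(2)
--         s3=mydata[i:i+12].count(3)
--         stats = {'0':s0,'1':s1,'2':s2,'3':s3}
--         sorted_x = sorted(stats.items(), key=operator.itemgetter(1),reverse=True)
--         values = [i[1] for i in sorted_x]
--         nkeys = [i[0] for i in sorted_x]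
--         if values[1:] == values[:-1]:
--             agglist[c]=0
--         elif values[0]==values[1] and values[1]==values[2]:
--             agglist[c]=0
--         elif values[0]==values[1]:
--             agglist[c]=0
--         else:
--             agglist[c]=int(nkeys[0])
--
--         c=c+1
--
--     return agglist
-- ===== SOURCE B (Python) =====
-- def _mode12(chunk):
--     counts = [chunk.count(v) for v in range(4)]
--     m = max(counts)
--     return 0 if counts.count(m) > 1 else counts.index(m)
--
-- def groupbyHour(mydata):
--     return [_mode12(mydata[i:i+12]) for i in range(0, 278, 12)]
-- ===== Notes on version B (the rewrite author's own statement) =====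
-- stated objective: simpler
-- what changed: Replaces the per-chunk dict of four counts plus a reverse sort and a collapsed if/elif cascade (all three live branches return 0) with a direct frequency list, max and tie-check (counts.count(m) > 1), returning the argmax index otherwise; the preallocated 24-slot list with a manual counter becomes a list comprehension.
import Mathlib
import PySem

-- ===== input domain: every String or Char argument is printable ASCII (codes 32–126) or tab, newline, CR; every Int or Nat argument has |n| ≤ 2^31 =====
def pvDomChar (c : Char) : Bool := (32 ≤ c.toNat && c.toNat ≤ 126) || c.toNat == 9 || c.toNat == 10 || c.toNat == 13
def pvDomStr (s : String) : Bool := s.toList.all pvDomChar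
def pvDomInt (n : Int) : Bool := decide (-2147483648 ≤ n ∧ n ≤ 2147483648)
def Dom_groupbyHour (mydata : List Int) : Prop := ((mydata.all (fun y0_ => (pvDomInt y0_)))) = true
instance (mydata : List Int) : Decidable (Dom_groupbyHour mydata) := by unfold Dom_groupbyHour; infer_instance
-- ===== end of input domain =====

-- B replaces A's per-chunk dict + reverse sort + collapsed if/elif cascade with a direct
-- 4-element frequency list, max and tie-check (same values on every input; objective: simpler).


-- ===== PORT A =====
-- Loop-body helper: from the four counts s0..s3 of one 12-element slice, A builds the dict
-- {'0':s0,…}, sorts its items by value in reverse, and runs the if/elif cascade.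
-- int(nkeys[0]) is ported as (PySem.Int.ofStr? …).getD 0; the key is always one of
-- "0".."3", so int() never raises and the default is never taken.
def hourPick (s0 s1 s2 s3 : Int) : Int :=
  let stats := PySem.Dict.ofList [("0",s0),("1",s1),("2",s2),("3",s3)]
  let sorted_x := PySem.List.sorted stats.items (fun p => p.2) true
  let values := sorted_x.map (fun p => p.2)
  let nkeys := sorted_x.map (fun p => p.1)
  if PySem.List.slice values (some 1) none == PySem.List.slice values none (some (-1)) then 0
  else if PySem.List.pyGetD values 0 0 == PySem.List.pyGetD values 1 0 && PySem.List.pyGetD values 1 0 == PySem.List.pyGetD values 2 0 then 0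
  else if PySem.List.pyGetD values 0 0 == PySem.List.pyGetD values 1 0 then 0
  else (PySem.Int.ofStr? (PySem.List.pyGetD nkeys 0 "")).getD 0

-- agglist[c] = v is ported with List.set; c runs over 0..23 and agglist has length 24,
-- so the assignment is always in range (exact).
def groupbyHour (mydata : List Int) : List Int :=
  let agglist : List Int := List.replicate 24 (-1)
  let final := (PySem.List.pyRange 0 278 12).foldl
    (fun (st : List Int × Nat) i =>
      let s0 : Int := PySem.List.count (PySem.List.slice mydata (some i) (some (i+12))) 0
      let s1 : Int := PySem.List.count (PySem.List.slice mydata (some i) (some (i+12))) 1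
      let s2 : Int := PySem.List.count (PySem.List.slice mydata (some i) (some (i+12))) 2
      let s3 : Int := PySem.List.count (PySem.List.slice mydata (some i) (some (i+12))) 3
      (st.1.set st.2 (hourPick s0 s1 s2 s3), st.2 + 1))
    (agglist, 0)
  final.1

-- ===== PORT B =====
-- counts is nonempty (4 entries) and m ∈ counts, so max() and counts.index(m) never
-- raise; the 'none' fallbacks are unreachable.
def mode12 (chunk : List Int) : Int :=
  let counts : List Int := (PySem.List.pyRange 0 4 1).map (fun v => (PySem.List.count chunk v : Int))
  match PySem.List.max? counts (fun x => x) with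
  | some m =>
    if PySem.List.count counts m > 1 then 0
    else match PySem.List.index? counts m with
      | some k => (k : Int)
      | none => 0
  | none => 0

def groupbyHour_alt (mydata : List Int) : List Int :=
  (PySem.List.pyRange 0 278 12).map
    (fun i => mode12 (PySem.List.slice mydata (some i) (some (i+12))))

-- ===== PRECONDITION & SPEC =====
def Spec_groupbyHour (mydata : List Int) (out : List Int) : Prop := out = groupbyHour_alt mydata
instance (mydata : List Int) (out : List Int) : Decidable (Spec_groupbyHour mydata out) := by unfold Spec_groupbyHour; infer_instance

-- ===== CLAIM (what is proved, stated in full; the proofs are below) =====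
def Claim_equal_groupbyHour : Prop := ∀ (mydata : List Int), Dom_groupbyHour mydata → Spec_groupbyHour mydata (groupbyHour mydata)

-- ===== LEMMAS AND PROOFS =====

-- B's loop body, written over the four counts (what mode12 computes on a chunk).
def tally4 (c0 c1 c2 c3 : Int) : Int :=
  let counts : List Int := [c0, c1, c2, c3]
  let m := [c1, c2, c3].foldl max c0
  if PySem.List.count counts m > 1 then 0
  else match PySem.List.index? counts m with
    | some k => (k : Int)
    | none => 0

theorem items_lit (a b c d : Int) : (PySem.Dict.ofList [("0",a),("1",b),("2",c),("3",d)]).items = [("0",a),("1",b),("2",c),("3",d)] := rfl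

theorem ofs0 : (PySem.Int.ofStr? "0").getD 0 = 0 := by decide
theorem ofs1 : (PySem.Int.ofStr? "1").getD 0 = 1 := by decide
theorem ofs2 : (PySem.Int.ofStr? "2").getD 0 = 2 := by decide
theorem ofs3 : (PySem.Int.ofStr? "3").getD 0 = 3 := by decide

theorem mode12_eq_tally4 (chunk : List Int) :
    mode12 chunk = tally4 (PySem.List.count chunk 0) (PySem.List.count chunk 1)
      (PySem.List.count chunk 2) (PySem.List.count chunk 3) := by
  simp only [mode12, tally4]
  rw [show PySem.List.pyRange 0 4 1 = [0,1,2,3] from rfl]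
  simp only [List.map]
  rw [PySem.List.max?_id_cons]

set_option maxHeartbeats 1000000 in
set_option maxRecDepth 2048 in
theorem hourPick_eq_tally4 (a b c d : Int) : hourPick a b c d = tally4 a b c d := by
  have hperm : (PySem.List.sorted ((PySem.Dict.ofList [("0",a),("1",b),("2",c),("3",d)]).items) (fun p => p.2) true).Perm [("0",a),("1",b),("2",c),("3",d)] := by
    rw [items_lit]; exact PySem.List.sorted_perm _ _ _
  have hpair := PySem.List.sorted_pairwise_rev ((PySem.Dict.ofList [("0",a),("1",b),("2",c),("3",d)]).items) (fun p => p.2)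
  obtain ⟨p, q, r, s, hL⟩ : ∃ p q r s, (PySem.List.sorted ((PySem.Dict.ofList [("0",a),("1",b),("2",c),("3",d)]).items) (fun p => p.2) true) = [p,q,r,s] := by
    have hlen : (PySem.List.sorted ((PySem.Dict.ofList [("0",a),("1",b),("2",c),("3",d)]).items) (fun p => p.2) true).length = 4 := by
      rw [hperm.length_eq]; rfl
    rcases hE : (PySem.List.sorted ((PySem.Dict.ofList [("0",a),("1",b),("2",c),("3",d)]).items) (fun p => p.2) true) with _ | ⟨p, _ | ⟨q, _ | ⟨r, _ | ⟨s, _ | ⟨t, u⟩⟩⟩⟩⟩ <;>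
      simp_all
  rw [hL] at hperm hpair
  have hqp : q.2 ≤ p.2 := by simp [List.pairwise_cons] at hpair; omega
  have hrq : r.2 ≤ q.2 := by simp [List.pairwise_cons] at hpair; omega
  have hsr : s.2 ≤ r.2 := by simp [List.pairwise_cons] at hpair; omega
  have hsnd : ([p,q,r,s].map (fun x => x.2)).Perm [a,b,c,d] := hperm.map _
  have hpmem : p ∈ [("0",a),("1",b),("2",c),("3",d)] := hperm.mem_iff.mp (by simp)
  have hMge := PySem.List.le_foldl_max [b,c,d] a
  have hMmem := PySem.List.foldl_max_mem [b,c,d] a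
  have hL' : PySem.List.sorted [("0",a),("1",b),("2",c),("3",d)] (fun p => p.2) true = [p,q,r,s] := by
    rw [← items_lit]; exact hL
  simp only [hourPick, tally4, items_lit, hL']
  simp only [List.map, PySem.List.slice_from_one, PySem.List.slice_to_neg_one]
  obtain ⟨M, hM⟩ : ∃ M : Int, M = [b,c,d].foldl max a := ⟨_, rfl⟩
  rw [← hM] at hMge hMmem ⊢
  have hMub : a ≤ M ∧ b ≤ M ∧ c ≤ M ∧ d ≤ M :=
    ⟨hMge.1, hMge.2 b (by simp), hMge.2 c (by simp), hMge.2 d (by simp)⟩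
  clear hM hMge
  have hp2mem : p.2 ∈ ([a,b,c,d] : List Int) := hsnd.mem_iff.mp (by simp)
  have hpM : p.2 = M := by
    have h1 : p.2 ≤ M := by simp at hp2mem; rcases hp2mem with h|h|h|h <;> omega
    have h2 : M ≤ p.2 := by
      have hmm : M ∈ ([a,b,c,d] : List Int) := by
        rcases hMmem with h|h
        · simp [h]
        · simp at h ⊢; tauto
      have := hsnd.mem_iff.mpr hmm
      simp at this; rcases this with h|h|h|h <;> omega
    omega
  have hcnt : ([p.2,q.2,r.2,s.2] : List Int).count M = ([a,b,c,d] : List Int).count M := by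
    simpa using hsnd.count_eq M
  clear hperm hpair hL hL' hMmem hp2mem
  by_cases htie : p.2 = q.2
  · -- tied top two: both sides return 0
    have hqM : q.2 = M := by omega
    have hB : 1 < ([a,b,c,d] : List Int).count M := by
      rw [← hcnt]; simp [List.count_cons, hpM, hqM]
    simp [htie, hB, PySem.List.count, PySem.List.pyGetD]
  · -- unique maximum: A returns int(nkeys[0]), B the argmax index
    have hqne : q.2 ≠ M := by omega
    have hrne : r.2 ≠ M := by omega
    have hsne : s.2 ≠ M := by omega
    have hc1 : ([a,b,c,d] : List Int).count M = 1 := by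
      rw [← hcnt]; simp [hpM, hqne, hrne, hsne]
    clear hsnd hcnt
    simp at hpmem
    rcases hpmem with hp | hp | hp | hp <;>
      simp_all [List.count_cons, PySem.List.count, PySem.List.index?, List.idxOf?,
        List.findIdx?_cons, PySem.List.pyGetD, ofs0, ofs1, ofs2, ofs3] <;>
      split_ifs <;> simp_all

theorem chunk_eq (chunk : List Int) :
    hourPick (PySem.List.count chunk 0) (PySem.List.count chunk 1)
      (PySem.List.count chunk 2) (PySem.List.count chunk 3) = mode12 chunk := by
  rw [mode12_eq_tally4, hourPick_eq_tally4]

-- A's fold over the literal range, with the set-at-counter updates, is the map of its body.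
theorem take_set_succ (acc : List Int) (k : Nat) (v : Int) (h : k < acc.length) :
    (acc.set k v).take (k+1) = acc.take k ++ [v] := by
  rw [List.take_add_one]
  simp [h, List.take_set, List.set_eq_of_length_le]

theorem fold_set_eq_map (f : Int → Int) :
    ∀ (l acc : List Int) (k : Nat), acc.length = k + l.length →
    (l.foldl (fun (st : List Int × Nat) i => (st.1.set st.2 (f i), st.2 + 1)) (acc, k)).1
      = acc.take k ++ l.map f
  | [], acc, k, h => by simpa using List.take_of_length_le (by simpa using h.le)
  | i :: t, acc, k, h => by
    simp only [List.foldl_cons, List.map_cons]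
    rw [fold_set_eq_map f t (acc.set k (f i)) (k+1) (by simp at h ⊢; omega)]
    rw [take_set_succ acc k (f i) (by simp at h ⊢; omega)]
    simp

theorem groupbyHour_eq_map (mydata : List Int) :
    groupbyHour mydata = (PySem.List.pyRange 0 278 12).map
      (fun i =>
        hourPick (PySem.List.count (PySem.List.slice mydata (some i) (some (i+12))) 0)
          (PySem.List.count (PySem.List.slice mydata (some i) (some (i+12))) 1)
          (PySem.List.count (PySem.List.slice mydata (some i) (some (i+12))) 2)
          (PySem.List.count (PySem.List.slice mydata (some i) (some (i+12))) 3)) := by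
  have h := fold_set_eq_map
    (fun i =>
      hourPick (PySem.List.count (PySem.List.slice mydata (some i) (some (i+12))) 0)
        (PySem.List.count (PySem.List.slice mydata (some i) (some (i+12))) 1)
        (PySem.List.count (PySem.List.slice mydata (some i) (some (i+12))) 2)
        (PySem.List.count (PySem.List.slice mydata (some i) (some (i+12))) 3))
    (PySem.List.pyRange 0 278 12) (List.replicate 24 (-1)) 0 (by rfl)
  simpa [groupbyHour] using h

-- ===== VERDICT (by name: the statement is the Claim_ definition above) =====
theorem groupbyHour_spec : Claim_equal_groupbyHour := by
  intro mydata _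
  unfold Spec_groupbyHour groupbyHour_alt
  rw [groupbyHour_eq_map]
  exact List.map_congr_left (fun i _ => chunk_eq _)
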